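-- pv_equiv track=rewrite | github.com/jennyd20/advent_of_code | 2024/day7.py | can_make_equation
-- ===== SOURCE A (Python) =====
-- def can_make_equation(val, nums, total, part1):
--     # Base case - if we've checked all the numbers in this equation, check for match and return
--     if not nums:
--         return total == val
--
--     # Pruning case - if the value is already too big, return
--     if total > val:
--         return False
--
--     # Recursive case - check both the addition and multiplicative cases.
--     new_operand, *rest = nums
--     result = (can_make_equation(val, rest, total * new_operand, part1)) or (
--         can_make_equation(val, rest, total + new_operand, part1)
--     )
--     if part1:
--         return result
--     # Part 2 - check when the current total is concatenated with the next value in the list of operands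
--     return result or can_make_equation(
--         val, rest, concat_nums(total, new_operand), part1
--     )
--
-- def concat_nums(a, b):
--     result = int(str(a) + str(b))
--     return result
-- ===== SOURCE B (Python) =====
-- def can_make_equation(val, nums, total, part1):
--     # Iterative breadth-first evaluation: keep the SET of reachable running
--     # totals (pruned at > val, deduplicated), one level per operand.
--     # Concatenation is only defined for a nonnegative right operand
--     # (int(str(t) + str(n)) raises for n < 0), so it is applied only then.
--     states = {total}
--     for n in nums:
--         nxt = set()
--         for t in states:
--             if t <= val:
--                 nxt.add(t * n)
--                 nxt.add(t + n)
--                 if not part1 and n >= 0: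
--                     nxt.add(concat_nums(t, n))
--         states = nxt
--     return val in states
--
--
-- def concat_nums(a, b):
--     return int(str(a) + str(b))
-- ===== Notes on version B (the rewrite author's own statement) =====
-- stated objective: alternative
-- what changed: Replaced the short-circuiting 3-way recursive DFS with an iterative level-by-level fold that maintains the deduplicated set of reachable running totals (pruned at > val) and checks membership of val at the end.
-- outside the precondition, e.g. on can_make_equation(5, [-1], 3, False): A raises ValueError, B returns False; on can_make_equation(2, [-2], -1, False): A returns True, B returns True; on can_make_equation(5, [100, -1], 1, False): A returns False, B returns False
import Mathlib
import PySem

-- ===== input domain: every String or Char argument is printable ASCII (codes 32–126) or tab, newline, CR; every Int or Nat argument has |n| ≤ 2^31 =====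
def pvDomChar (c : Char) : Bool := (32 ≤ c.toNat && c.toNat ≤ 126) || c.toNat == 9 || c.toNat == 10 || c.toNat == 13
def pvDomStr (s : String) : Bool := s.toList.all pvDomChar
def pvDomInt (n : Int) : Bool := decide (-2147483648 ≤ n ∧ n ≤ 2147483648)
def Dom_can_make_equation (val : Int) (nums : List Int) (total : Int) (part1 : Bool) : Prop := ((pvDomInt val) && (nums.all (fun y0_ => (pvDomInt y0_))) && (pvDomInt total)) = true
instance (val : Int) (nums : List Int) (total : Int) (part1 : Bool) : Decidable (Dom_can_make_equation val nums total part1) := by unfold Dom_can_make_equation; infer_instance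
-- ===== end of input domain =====

-- B replaces A's short-circuiting 3-way recursive DFS by an iterative fold over the
-- deduplicated set of reachable running totals (objective: alternative algorithm).

-- ===== PORT A =====
-- concat_nums(a, b) = int(str(a) + str(b)); exact whenever b ≥ 0 (the only calls A
-- makes on inputs in Pre_); the .getD 0 default is never produced there.
def concatNums (a b : Int) : Int :=
  (PySem.Int.ofChars? (PySem.Int.toChars a ++ PySem.Int.toChars b)).getD 0

def can_make_equation (val : Int) (nums : List Int) (total : Int) (part1 : Bool) : Bool :=
  match nums with
  | [] => total == val
  | new_operand :: rest =>
    if total > val then false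
    else
      let result := can_make_equation val rest (total * new_operand) part1 ||
                    can_make_equation val rest (total + new_operand) part1
      if part1 then result
      else result || can_make_equation val rest (concatNums total new_operand) part1

-- ===== PORT B =====
-- one level of Source B's loop: expand every kept total by the applicable operators
def stepStates (val : Int) (part1 : Bool) (states : PySem.Set Int) (n : Int) : PySem.Set Int :=
  states.foldl (fun acc t =>
    if t ≤ val then
      let acc1 := PySem.Set.add acc (t * n)
      let acc2 := PySem.Set.add acc1 (t + n)
      if part1 = false ∧ 0 ≤ n then PySem.Set.add acc2 (concatNums t n) else acc2
    else acc) PySem.Set.empty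

def can_make_equation_alt (val : Int) (nums : List Int) (total : Int) (part1 : Bool) : Bool :=
  PySem.Set.contains (nums.foldl (stepStates val part1) (PySem.Set.ofList [total])) val

-- ===== PRECONDITION & SPEC =====
-- Pre_ excludes part-2 inputs that contain a negative operand while the starting total
-- is not already past val: on some of those A's concat_nums raises ValueError, and the
-- exact raising set depends on A's short-circuit evaluation order, so the whole region
-- is excluded (B still returns A's value on the excluded inputs where A returns).
def Pre_can_make_equation (val : Int) (nums : List Int) (total : Int) (part1 : Bool) : Prop :=
  part1 = true ∨ (∀ n ∈ nums, 0 ≤ n) ∨ val < total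
instance (val : Int) (nums : List Int) (total : Int) (part1 : Bool) : Decidable (Pre_can_make_equation val nums total part1) := by unfold Pre_can_make_equation; infer_instance

def pvWitness_can_make_equation : Int × List Int × Int × Bool := (190, [19, 10], 0, false)

def Spec_can_make_equation (val : Int) (nums : List Int) (total : Int) (part1 : Bool) (out : Bool) : Prop := out = can_make_equation_alt val nums total part1
instance (val : Int) (nums : List Int) (total : Int) (part1 : Bool) (out : Bool) : Decidable (Spec_can_make_equation val nums total part1 out) := by unfold Spec_can_make_equation; infer_instance

-- ===== CLAIM (what is proved, stated in full; the proofs are below) =====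
def Claim_equal_can_make_equation : Prop := ∀ (val : Int) (nums : List Int) (total : Int) (part1 : Bool), Dom_can_make_equation val nums total part1 → Pre_can_make_equation val nums total part1 → Spec_can_make_equation val nums total part1 (can_make_equation val nums total part1)

-- ===== LEMMAS AND PROOFS =====

-- one iteration of Source B's inner loop
lemma mem_step_body (val n t : Int) (part1 : Bool) (acc : PySem.Set Int) (x : Int) :
    (x ∈ (if t ≤ val then
          let acc1 := PySem.Set.add acc (t * n)
          let acc2 := PySem.Set.add acc1 (t + n)
          if part1 = false ∧ 0 ≤ n then PySem.Set.add acc2 (concatNums t n) else acc2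
        else acc)) ↔
      x ∈ acc ∨ (t ≤ val ∧ (x = t * n ∨ x = t + n ∨
        (part1 = false ∧ 0 ≤ n ∧ x = concatNums t n))) := by
  by_cases ht : t ≤ val <;> cases part1 <;> by_cases hn : (0:Int) ≤ n <;>
    simp [ht, hn, PySem.Set.mem_add] <;> tauto

-- membership in one expansion level
lemma mem_stepStates (val n : Int) (part1 : Bool) (S : PySem.Set Int) (x : Int) :
    x ∈ stepStates val part1 S n ↔
      ∃ t ∈ S, t ≤ val ∧ (x = t * n ∨ x = t + n ∨
        (part1 = false ∧ 0 ≤ n ∧ x = concatNums t n)) := by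
  unfold stepStates
  have aux : ∀ (L : List Int) (acc : PySem.Set Int),
      x ∈ L.foldl (fun acc t =>
        if t ≤ val then
          let acc1 := PySem.Set.add acc (t * n)
          let acc2 := PySem.Set.add acc1 (t + n)
          if part1 = false ∧ 0 ≤ n then PySem.Set.add acc2 (concatNums t n) else acc2
        else acc) acc ↔
      x ∈ acc ∨ ∃ t ∈ L, t ≤ val ∧
        (x = t * n ∨ x = t + n ∨ (part1 = false ∧ 0 ≤ n ∧ x = concatNums t n)) := by
    intro L
    induction L with
    | nil => simp
    | cons t L ih =>
      intro acc
      rw [List.foldl_cons, ih, mem_step_body]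
      constructor
      · rintro ((h | h) | ⟨u, hu1, hu2⟩)
        · exact Or.inl h
        · exact Or.inr ⟨t, List.mem_cons_self, h⟩
        · exact Or.inr ⟨u, List.mem_cons_of_mem _ hu1, hu2⟩
      · rintro (h | ⟨u, hu1, hu2⟩)
        · exact Or.inl (Or.inl h)
        · rcases List.mem_cons.mp hu1 with rfl | hu1
          · exact Or.inl (Or.inr hu2)
          · exact Or.inr ⟨u, hu1, hu2⟩
  rw [aux]; simp [PySem.Set.empty]

-- A's recursive case, written as a Boolean equation without the short-circuit lets
lemma A_cons_iff (val n : Int) (rest : List Int) (t : Int) (part1 : Bool) :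
    can_make_equation val (n :: rest) t part1 = true ↔
      t ≤ val ∧ (can_make_equation val rest (t * n) part1 = true ∨
                 can_make_equation val rest (t + n) part1 = true ∨
                 (part1 = false ∧ can_make_equation val rest (concatNums t n) part1 = true)) := by
  show (if t > val then false else _) = true ↔ _
  by_cases ht : t > val
  · simp only [if_pos ht]
    simp; omega
  · simp only [if_neg ht]
    have htle : t ≤ val := not_lt.mp ht
    cases part1 <;> simp [htle] <;> tauto

-- on operand lists with no negative entry (or in part 1), B's fold finds val iff A
-- succeeds from some total in the current level
lemma fold_iff_exists (val : Int) (part1 : Bool) :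
    ∀ (ns : List Int), (part1 = true ∨ ∀ n ∈ ns, 0 ≤ n) → ∀ (S : PySem.Set Int),
      (PySem.Set.contains (ns.foldl (stepStates val part1) S) val = true ↔
        ∃ t ∈ S, can_make_equation val ns t part1 = true) := by
  intro ns
  induction ns with
  | nil =>
    intro _ S
    simp [can_make_equation]
  | cons n rest ih =>
    intro hp S
    have hrest : part1 = true ∨ ∀ m ∈ rest, 0 ≤ m := by
      rcases hp with h | h
      · exact Or.inl h
      · exact Or.inr fun m hm => h m (List.mem_cons_of_mem _ hm)
    rw [List.foldl_cons, ih hrest]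
    constructor
    · rintro ⟨u, hu, hA⟩
      rcases (mem_stepStates val n part1 S u).mp hu with ⟨t, htS, htle, hcase⟩
      refine ⟨t, htS, (A_cons_iff ..).mpr ⟨htle, ?_⟩⟩
      rcases hcase with rfl | rfl | ⟨hp1, _, rfl⟩
      · exact Or.inl hA
      · exact Or.inr (Or.inl hA)
      · exact Or.inr (Or.inr ⟨hp1, hA⟩)
    · rintro ⟨t, htS, hA⟩
      rcases (A_cons_iff ..).mp hA with ⟨htle, hA | hA | ⟨hp1, hA⟩⟩
      · exact ⟨t * n, (mem_stepStates ..).mpr ⟨t, htS, htle, Or.inl rfl⟩, hA⟩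
      · exact ⟨t + n, (mem_stepStates ..).mpr ⟨t, htS, htle, Or.inr (Or.inl rfl)⟩, hA⟩
      · have hn : (0:Int) ≤ n := by
          rcases hp with h | h
          · rw [hp1] at h; exact absurd h (by simp)
          · exact h n List.mem_cons_self
        exact ⟨concatNums t n,
          (mem_stepStates ..).mpr ⟨t, htS, htle, Or.inr (Or.inr ⟨hp1, hn, rfl⟩)⟩, hA⟩

-- when every current total already exceeds val, B's fold can never contain val
lemma fold_none (val : Int) (part1 : Bool) :
    ∀ (ns : List Int) (S : PySem.Set Int), (∀ t ∈ S, val < t) →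
      PySem.Set.contains (ns.foldl (stepStates val part1) S) val = false := by
  intro ns
  induction ns with
  | nil =>
    intro S hS
    rw [← Bool.not_eq_true, PySem.Set.contains_iff]
    intro hv; exact lt_irrefl val (hS val hv)
  | cons n rest ih =>
    intro S hS
    rw [List.foldl_cons]
    apply ih
    intro t ht
    rcases (mem_stepStates val n part1 S t).mp ht with ⟨u, huS, hule, _⟩
    exact absurd hule (not_le.mpr (hS u huS))

-- ===== VERDICT (by name: the statement is the Claim_ definition above) =====
theorem can_make_equation_spec : Claim_equal_can_make_equation := by
  intro val nums total part1 _ hpre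
  unfold Spec_can_make_equation can_make_equation_alt
  have hone : PySem.Set.ofList [total] = [total] := by
    simp [PySem.Set.ofList_eq_self_of_nodup]
  rcases hpre with hp | hp | hp
  · have h := fold_iff_exists val part1 nums (Or.inl hp) (PySem.Set.ofList [total])
    rw [hone] at h
    simp only [List.mem_singleton, exists_eq_left] at h
    cases hA : can_make_equation val nums total part1 <;>
      cases hB : PySem.Set.contains (nums.foldl (stepStates val part1) [total]) val <;>
      simp_all
  · have h := fold_iff_exists val part1 nums (Or.inr hp) (PySem.Set.ofList [total])
    rw [hone] at h
    simp only [List.mem_singleton, exists_eq_left] at h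
    cases hA : can_make_equation val nums total part1 <;>
      cases hB : PySem.Set.contains (nums.foldl (stepStates val part1) [total]) val <;>
      simp_all
  · have hB := fold_none val part1 nums (PySem.Set.ofList [total])
      (by rw [hone]; intro t ht; rw [List.mem_singleton] at ht; omega)
    rw [hB]
    cases nums with
    | nil => simp [can_make_equation]; omega
    | cons n rest =>
      show (if total > val then false else _) = false
      rw [if_pos hp]
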